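-- pv_equiv track=rewrite | github.com/Rheza31/SoalPengantarUjian_PemrogramanLanjut_AnggaraRhezaNurprasetya | SoalPengantarUjian.py | mystery
-- ===== SOURCE A (Python) =====
-- def mystery(n, m):
--     p = 0
--     e = 0
--     while n > 0:
--         p += 1
--         e += m
--         n -= 1
--     return p
-- ===== SOURCE B (Python) =====
-- def mystery(n, m):
--     return n if n > 0 else 0
-- ===== Notes on version B (the rewrite author's own statement) =====
-- stated objective: faster
-- what changed: Replaces the O(n) counting loop (with its dead e accumulator) by the closed form max(n, 0).
import Mathlib
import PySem

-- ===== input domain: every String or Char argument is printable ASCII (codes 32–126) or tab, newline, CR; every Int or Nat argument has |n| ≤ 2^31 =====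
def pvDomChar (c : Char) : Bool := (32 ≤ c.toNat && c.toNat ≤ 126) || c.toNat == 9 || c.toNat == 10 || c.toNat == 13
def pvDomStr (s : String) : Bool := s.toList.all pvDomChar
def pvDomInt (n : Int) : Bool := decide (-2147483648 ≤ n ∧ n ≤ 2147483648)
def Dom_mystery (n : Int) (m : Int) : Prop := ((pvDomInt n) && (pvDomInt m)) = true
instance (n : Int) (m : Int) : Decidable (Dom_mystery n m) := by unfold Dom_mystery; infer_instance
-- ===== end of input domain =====

-- B replaces A's O(n) counting loop by the closed form max(n, 0).

-- ===== PORT A =====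
-- literal port of A's while-loop; fuel = n.toNat only makes the recursion total
def mysteryGo (fuel : Nat) (n p e m : Int) : Int :=
  match fuel with
  | 0 => p
  | f + 1 => if n > 0 then mysteryGo f (n - 1) (p + 1) (e + m) m else p

def mystery (n : Int) (m : Int) : Int := mysteryGo n.toNat n 0 0 m

-- ===== PORT B =====
def mystery_alt (n : Int) (_m : Int) : Int := if n > 0 then n else 0

-- ===== PRECONDITION & SPEC =====
def Spec_mystery (n : Int) (m : Int) (out : Int) : Prop := out = mystery_alt n m

instance (n : Int) (m : Int) (out : Int) : Decidable (Spec_mystery n m out) := by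
  unfold Spec_mystery; infer_instance

-- ===== CLAIM (what is proved, stated in full; the proofs are below) =====
def Claim_equal_mystery : Prop := ∀ (n : Int) (m : Int), Dom_mystery n m → Spec_mystery n m (mystery n m)

-- ===== LEMMAS AND PROOFS =====
theorem mysteryGo_closed (fuel : Nat) : ∀ (n p e m : Int), n.toNat ≤ fuel →
    mysteryGo fuel n p e m = p + (if n > 0 then n else 0) := by
  induction fuel with
  | zero =>
    intro n p e m h
    have : ¬ n > 0 := by omega
    simp [mysteryGo, this]
  | succ f ih =>
    intro n p e m h
    by_cases hn : n > 0
    · have hle : (n - 1).toNat ≤ f := by omega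
      simp only [mysteryGo, if_pos hn, ih (n - 1) (p + 1) (e + m) m hle]
      by_cases h1 : n - 1 > 0 <;> simp [h1] <;> omega
    · simp [mysteryGo, hn]

-- ===== VERDICT (by name: the statement is the Claim_ definition above) =====
theorem mystery_spec : Claim_equal_mystery := by
  intro n m _
  unfold Spec_mystery mystery mystery_alt
  rw [mysteryGo_closed n.toNat n 0 0 m le_rfl]
  omega
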